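-- pv_equiv track=rewrite | github.com/SimAin/Markdown-Toc | markdownToc.py | remove_code_blocks
-- ===== SOURCE A (Python) =====
-- from typing import List, Tuple
--
-- def remove_code_blocks(content: List[str]) -> List[str]:
--     """
--     Removes lines starting with "```" (=code blocks) from the markdown file.
--     Since code blocks can contain lines with leading hashtags
--     (e.g. comments in python) they need to be removed before
--     looking for headers.
--     :param content: file contents as a list of strings
--     :return: Cleaned file contents as a list of strings
--     """
--     content_cleaned = []
--     code_block = False
--
--     for x in content:
--         if x[:3] == "```":
--             code_block = not code_block
--         elif not code_block:
--             content_cleaned.append(x)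
--
--     return content_cleaned
-- ===== SOURCE B (Python) =====
-- def remove_code_blocks(content):
--     """
--     Removes code-block regions from markdown content by scanning with an
--     index in two explicit modes: copy lines until an opening fence, then
--     skip lines until the closing fence (an unmatched opener drops the tail).
--     Fence lines themselves are never kept.
--     """
--     out = []
--     i = 0
--     n = len(content)
--     while i < n:
--         if content[i][:3] == "```":
--             # inside a code block: skip until the closing fence (or the end)
--             i += 1
--             while i < n and content[i][:3] != "```":
--                 i += 1
--             i += 1
--         else:
--             out.append(content[i])
--             i += 1
--     return out
-- ===== Notes on version B (the rewrite author's own statement) =====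
-- stated objective: alternative
-- what changed: Replaces the boolean toggle flag with an index scan in two explicit modes: copy lines until an opening fence, then skip forward to the closing fence and resume; no per-line state flag is carried.
import Mathlib
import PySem

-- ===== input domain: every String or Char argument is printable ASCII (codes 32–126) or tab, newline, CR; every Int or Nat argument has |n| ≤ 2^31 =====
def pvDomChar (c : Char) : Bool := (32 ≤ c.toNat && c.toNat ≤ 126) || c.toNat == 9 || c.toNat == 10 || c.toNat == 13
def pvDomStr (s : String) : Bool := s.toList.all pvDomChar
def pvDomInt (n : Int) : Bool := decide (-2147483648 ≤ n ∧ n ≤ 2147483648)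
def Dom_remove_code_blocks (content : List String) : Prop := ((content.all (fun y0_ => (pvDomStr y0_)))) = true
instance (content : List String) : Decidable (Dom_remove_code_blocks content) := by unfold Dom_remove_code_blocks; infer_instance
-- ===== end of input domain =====

-- B replaces A's boolean toggle flag with a two-mode scan (copy until fence / skip to closing fence); same output, proved equal on Dom.


-- ===== PORT A =====
-- the for-loop of A: state = (content_cleaned, code_block); x[:3] == "```" via PySem.Str.slice
def removeLoopA (content_cleaned : List String) (code_block : Bool) : List String → List String
  | [] => content_cleaned
  | x :: rest =>
    if PySem.Str.slice x none (some 3) = "```" then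
      removeLoopA content_cleaned (!code_block) rest
    else if !code_block then
      removeLoopA (content_cleaned ++ [x]) code_block rest
    else
      removeLoopA content_cleaned code_block rest

def remove_code_blocks (content : List String) : List String :=
  removeLoopA [] false content

-- ===== PORT B =====
-- inner while of Source B: advance past lines until (and including) the closing fence
def skipToFence : List String → List String
  | [] => []
  | x :: rest =>
    if PySem.Str.slice x none (some 3) = "```" then rest else skipToFence rest

theorem skipToFence_length_le : ∀ (xs : List String), (skipToFence xs).length ≤ xs.length
  | [] => Nat.le_refl 0
  | x :: rest => by
    simp only [skipToFence]
    split
    · exact Nat.le_succ _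
    · exact Nat.le_trans (skipToFence_length_le rest) (Nat.le_succ _)

-- outer while of Source B: copy lines; at a fence, jump past the block and continue
def remove_code_blocks_alt (content : List String) : List String :=
  match content with
  | [] => []
  | x :: rest =>
    if PySem.Str.slice x none (some 3) = "```" then
      remove_code_blocks_alt (skipToFence rest)
    else
      x :: remove_code_blocks_alt rest
termination_by content.length
decreasing_by
  · exact Nat.lt_succ_of_le (skipToFence_length_le rest)
  · exact Nat.lt_succ_self _

-- ===== PRECONDITION & SPEC =====
def Spec_remove_code_blocks (content : List String) (out : List String) : Prop := out = remove_code_blocks_alt content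
instance (content : List String) (out : List String) : Decidable (Spec_remove_code_blocks content out) := by unfold Spec_remove_code_blocks; infer_instance

-- ===== CLAIM (what is proved, stated in full; the proofs are below) =====
def Claim_equal_remove_code_blocks : Prop := ∀ (content : List String), Dom_remove_code_blocks content → Spec_remove_code_blocks content (remove_code_blocks content)

-- ===== LEMMAS AND PROOFS =====
-- invariant of A's loop: with flag off it appends B's result; with flag on it appends B's result after the closing fence
theorem removeLoopA_alt : ∀ (xs : List String) (acc : List String),
    removeLoopA acc false xs = acc ++ remove_code_blocks_alt xs ∧
    removeLoopA acc true xs = acc ++ remove_code_blocks_alt (skipToFence xs) := by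
  intro xs
  induction xs with
  | nil => intro acc; simp [removeLoopA, remove_code_blocks_alt, skipToFence]
  | cons x rest ih =>
    intro acc
    by_cases h : PySem.Str.slice x none (some 3) = "```"
    · constructor
      · rw [removeLoopA, if_pos h, remove_code_blocks_alt, if_pos h]
        exact (ih acc).2
      · rw [removeLoopA, if_pos h]
        rw [show skipToFence (x :: rest) = rest from by rw [skipToFence, if_pos h]]
        exact (ih acc).1
    · constructor
      · rw [removeLoopA, if_neg h]
        simp only [Bool.not_false, if_pos]
        rw [remove_code_blocks_alt, if_neg h, (ih (acc ++ [x])).1, List.append_assoc]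
        rfl
      · rw [removeLoopA, if_neg h]
        simp only [Bool.not_true, Bool.false_eq_true]
        rw [show skipToFence (x :: rest) = skipToFence rest from by rw [skipToFence, if_neg h]]
        exact (ih acc).2

-- ===== VERDICT (by name: the statement is the Claim_ definition above) =====
theorem remove_code_blocks_spec : Claim_equal_remove_code_blocks := by
  intro content _
  unfold Spec_remove_code_blocks remove_code_blocks
  simpa using (removeLoopA_alt content []).1
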